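-- pv_equiv track=rewrite | github.com/conlanmah/StupidPrinterWifiButtonCounter | count.py | keypress_instructions
-- ===== SOURCE A (Python) =====
-- def keypress_instructions(password: str):
--     rotation = "~}|{zyxwvutsrqponmlkjihgfedcba`_^]\\[ZYXWVUTSRQPONMLKJIHGFEDCBA@?>=<;:9876543210/.-,+*)('&%$#\"!"
--     instructions = []
--
--     for char in password:
--         if char not in rotation:
--             instructions.append(f"{char} not in rotation")
--             continue
--
--         down_index = rotation.index(char)
--         up_index = len(rotation) - 1 - rotation[::-1].index(char)
--
--         down_presses = 2 + down_index
--         up_presses = 2 + (len(rotation) - 1 - up_index)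
--
--         if down_presses <= up_presses:
--             instructions.append(f"{char}: down {down_presses}")
--         else:
--             instructions.append(f"{char}: up {up_presses}")
--
--     return instructions
-- ===== SOURCE B (Python) =====
-- def keypress_instructions(password: str):
--     # The rotation string is exactly the printable ASCII characters from '~' (126)
--     # down to '!' (33); a character at code o sits at index 126-o, so the down
--     # distance is 128-o and the up distance is o-31, down wins iff o >= 80.
--     out = []
--     for ch in password:
--         o = ord(ch)
--         if 33 <= o <= 126:
--             if o >= 80:
--                 out.append(f"{ch}: down {128 - o}")
--             else:
--                 out.append(f"{ch}: up {o - 31}")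
--         else:
--             out.append(f"{ch} not in rotation")
--     return out
-- ===== Notes on version B (the rewrite author's own statement) =====
-- stated objective: faster
-- what changed: B drops the rotation string entirely: since the rotation is exactly the ASCII codes 126 down to 33, B computes the instruction in closed form from ord(ch) (in rotation iff 33<=o<=126, down distance 128-o, up distance o-31, down wins iff o>=80), instead of A's per-character membership test, index scan, string reversal and reversed index scan.
import Mathlib
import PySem

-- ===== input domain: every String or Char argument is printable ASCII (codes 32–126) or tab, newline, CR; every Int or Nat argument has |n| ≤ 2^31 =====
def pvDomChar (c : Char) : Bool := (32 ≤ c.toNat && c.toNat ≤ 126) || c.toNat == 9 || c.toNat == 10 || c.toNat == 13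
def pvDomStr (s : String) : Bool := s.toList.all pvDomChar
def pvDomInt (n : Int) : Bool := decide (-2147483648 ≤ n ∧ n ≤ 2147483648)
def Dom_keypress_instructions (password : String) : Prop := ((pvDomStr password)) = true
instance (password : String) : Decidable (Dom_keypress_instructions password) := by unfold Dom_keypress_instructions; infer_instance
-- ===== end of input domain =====

-- B replaces A's per-character rotation-string scans with closed-form arithmetic on the character code (the rotation is exactly ASCII 126 down to 33); measured faster.


-- the rotation string of A, as its character list
def pvRotChars : List Char := "~}|{zyxwvutsrqponmlkjihgfedcba`_^]\\[ZYXWVUTSRQPONMLKJIHGFEDCBA@?>=<;:9876543210/.-,+*)('&%$#\"!".toList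

-- ===== PORT A =====
-- loop over password, appending one instruction per character; 'char not in rotation' (single char) is membership;
-- rotation.index is PySem.List.index? (the .getD 0 is unreachable: the branch is guarded by the membership test);
-- rotation[::-1] is List.reverse (exact for a full -1-step slice)
def keypress_instructions (password : String) : List String :=
  password.toList.foldl (fun instructions char =>
    if pvRotChars.contains char = false then
      instructions ++ [String.ofList (char :: " not in rotation".toList)]
    else
      let down_index : Nat := (PySem.List.index? pvRotChars char).getD 0
      let up_index : Nat := pvRotChars.length - 1 - (PySem.List.index? pvRotChars.reverse char).getD 0
      let down_presses : Int := 2 + (down_index : Int)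
      let up_presses : Int := 2 + ((pvRotChars.length : Int) - 1 - (up_index : Int))
      if down_presses ≤ up_presses then
        instructions ++ [String.ofList (char :: (": down ".toList ++ PySem.Int.toChars down_presses))]
      else
        instructions ++ [String.ofList (char :: (": up ".toList ++ PySem.Int.toChars up_presses))]
  ) []

-- ===== PORT B =====
-- B uses no rotation string: for a character of code o, 33 ≤ o ≤ 126 means it is in the rotation,
-- the down distance is 128 - o, the up distance is o - 31, and down wins the tie-break iff o ≥ 80.
-- ord(ch) is Char.toNat (exact on this domain); f-strings are built as the corresponding char lists.
def pvStepB (c : Char) : String :=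
  let o : Int := (c.toNat : Int)
  if 33 ≤ o ∧ o ≤ 126 then
    if 80 ≤ o then String.ofList (c :: (": down ".toList ++ PySem.Int.toChars (128 - o)))
    else String.ofList (c :: (": up ".toList ++ PySem.Int.toChars (o - 31)))
  else String.ofList (c :: " not in rotation".toList)

def keypress_instructions_alt (password : String) : List String :=
  password.toList.foldl (fun out c => out ++ [pvStepB c]) []

-- ===== PRECONDITION & SPEC =====
def Spec_keypress_instructions (password : String) (out : List String) : Prop := out = keypress_instructions_alt password
instance (password : String) (out : List String) : Decidable (Spec_keypress_instructions password out) := by unfold Spec_keypress_instructions; infer_instance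

-- ===== CLAIM (what is proved, stated in full; the proofs are below) =====
def Claim_equal_keypress_instructions : Prop := ∀ (password : String), Dom_keypress_instructions password → Spec_keypress_instructions password (keypress_instructions password)

-- ===== LEMMAS AND PROOFS =====

set_option maxRecDepth 16384 in
theorem pvRot_nodup : pvRotChars.Nodup := by decide

theorem pvRot_len : pvRotChars.length = 94 := by decide

-- A's per-character instruction, factored out of the loop body
def pvStepA (char : Char) : String :=
  if pvRotChars.contains char = false then
    String.ofList (char :: " not in rotation".toList)
  else
    let down_index : Nat := (PySem.List.index? pvRotChars char).getD 0
    let up_index : Nat := pvRotChars.length - 1 - (PySem.List.index? pvRotChars.reverse char).getD 0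
    let down_presses : Int := 2 + (down_index : Int)
    let up_presses : Int := 2 + ((pvRotChars.length : Int) - 1 - (up_index : Int))
    if down_presses ≤ up_presses then
      String.ofList (char :: (": down ".toList ++ PySem.Int.toChars down_presses))
    else
      String.ofList (char :: (": up ".toList ++ PySem.Int.toChars up_presses))

theorem pv_foldl_app (f : Char → String) (l : List Char) (acc : List String) :
    l.foldl (fun out c => out ++ [f c]) acc = acc ++ l.map f := by
  induction l generalizing acc with
  | nil => simp
  | cons x xs ih => simp [List.foldl_cons, ih]

theorem pvA_eq_map (l : List Char) (acc : List String) :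
    l.foldl (fun instructions char =>
      if pvRotChars.contains char = false then
        instructions ++ [String.ofList (char :: " not in rotation".toList)]
      else
        let down_index : Nat := (PySem.List.index? pvRotChars char).getD 0
        let up_index : Nat := pvRotChars.length - 1 - (PySem.List.index? pvRotChars.reverse char).getD 0
        let down_presses : Int := 2 + (down_index : Int)
        let up_presses : Int := 2 + ((pvRotChars.length : Int) - 1 - (up_index : Int))
        if down_presses ≤ up_presses then
          instructions ++ [String.ofList (char :: (": down ".toList ++ PySem.Int.toChars down_presses))]
        else
          instructions ++ [String.ofList (char :: (": up ".toList ++ PySem.Int.toChars up_presses))]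
      ) acc = acc ++ l.map pvStepA := by
  induction l generalizing acc with
  | nil => simp
  | cons x xs ih =>
    simp only [List.foldl_cons, List.map_cons, ih, pvStepA]
    split_ifs <;> simp

-- the rotation character at index i has code 126 - i (getD form so 'decide' can evaluate it)
set_option maxRecDepth 16384 in
theorem pvRot_getD_toNat : ∀ i < 94, (pvRotChars.getD i ' ').toNat = 126 - i := by decide

theorem pvRot_getElem_toNat (i : Nat) (h : i < pvRotChars.length) :
    pvRotChars[i].toNat = 126 - i := by
  have := pvRot_getD_toNat i (by rw [pvRot_len] at h; omega)
  rwa [List.getD_eq_getElem _ _ h] at this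

-- a character of code 33..126 is the rotation character at index 126 - code
theorem pvChar_eq_rot (c : Char) (h1 : 33 ≤ c.toNat) (h2 : c.toNat ≤ 126) :
    ∃ (h : 126 - c.toNat < pvRotChars.length), pvRotChars[126 - c.toNat] = c := by
  have hlt : 126 - c.toNat < pvRotChars.length := by rw [pvRot_len]; omega
  refine ⟨hlt, ?_⟩
  have htn : (pvRotChars[126 - c.toNat]'hlt).toNat = c.toNat := by
    rw [pvRot_getElem_toNat (126 - c.toNat) hlt]; omega
  exact Char.ext (UInt32.toNat_inj.mp htn)

theorem pvRot_mem_iff (c : Char) : c ∈ pvRotChars ↔ (33 ≤ c.toNat ∧ c.toNat ≤ 126) := by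
  constructor
  · intro hmem
    obtain ⟨i, hi, rfl⟩ := List.mem_iff_getElem.mp hmem
    have := pvRot_getElem_toNat i hi
    have h94 : i < 94 := by rw [pvRot_len] at hi; omega
    omega
  · intro ⟨h1, h2⟩
    obtain ⟨h, he⟩ := pvChar_eq_rot c h1 h2
    exact he ▸ List.getElem_mem h

theorem pvIndex_eq (c : Char) (h1 : 33 ≤ c.toNat) (h2 : c.toNat ≤ 126) :
    PySem.List.index? pvRotChars c = some (126 - c.toNat) := by
  have hmem : c ∈ pvRotChars := (pvRot_mem_iff c).mpr ⟨h1, h2⟩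
  obtain ⟨j, hj⟩ := Option.isSome_iff_exists.mp ((PySem.List.index?_isSome_iff _ _).mpr hmem)
  obtain ⟨hjlt, hjc, _⟩ := PySem.List.getElem_of_index?_eq_some hj
  obtain ⟨hlt, he⟩ := pvChar_eq_rot c h1 h2
  have : j = 126 - c.toNat := (List.Nodup.getElem_inj_iff pvRot_nodup).mp (hjc.trans he.symm)
  rw [hj, this]

-- reversed first index of c is length - 1 - (first index), since the rotation has no duplicates
theorem pvRev_index (c : Char) (i : Nat) (h : PySem.List.index? pvRotChars c = some i) :
    PySem.List.index? pvRotChars.reverse c = some (pvRotChars.length - 1 - i) := by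
  obtain ⟨hk, hc, _⟩ := PySem.List.getElem_of_index?_eq_some h
  have hmemrev : c ∈ pvRotChars.reverse := by
    rw [List.mem_reverse]; exact hc ▸ List.getElem_mem hk
  obtain ⟨j, hj⟩ := Option.isSome_iff_exists.mp (((PySem.List.index?_isSome_iff _ _).mpr hmemrev))
  obtain ⟨hjlt, hjc, _⟩ := PySem.List.getElem_of_index?_eq_some hj
  rw [List.length_reverse] at hjlt
  rw [List.getElem_reverse] at hjc
  have hij : pvRotChars.length - 1 - j = i := by
    have heq : pvRotChars[pvRotChars.length - 1 - j]'(by omega) = pvRotChars[i] := by rw [hjc, hc]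
    exact (List.Nodup.getElem_inj_iff pvRot_nodup).mp heq
  rw [hj]
  congr 1
  omega

theorem pvStep_eq (c : Char) : pvStepA c = pvStepB c := by
  unfold pvStepA pvStepB
  by_cases hmem : c ∈ pvRotChars
  · have hr := (pvRot_mem_iff c).mp hmem
    have h1 := hr.1
    have h2 := hr.2
    have hidx := pvIndex_eq c h1 h2
    have hrev := pvRev_index c _ hidx
    rw [if_neg (by simp [hmem])]
    simp only [hidx, hrev, Option.getD_some, pvRot_len]
    conv_rhs => rw [if_pos (show (33:Int) ≤ (c.toNat:Int) ∧ ((c.toNat:Int) ≤ 126) from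
      ⟨by exact_mod_cast h1, by exact_mod_cast h2⟩)]
    split_ifs with hA h80
    · congr 4
      omega
    · exfalso
      omega
    · exfalso
      omega
    · congr 4
      omega
  · rw [if_pos (by simp [hmem])]
    have h33 : c.toNat < 33 ∨ 126 < c.toNat := by
      by_contra hc
      push Not at hc
      exact hmem ((pvRot_mem_iff c).mpr ⟨by omega, by omega⟩)
    rcases h33 with h | h <;> rw [if_neg (by omega)]

-- ===== VERDICT (by name: the statement is the Claim_ definition above) =====
theorem keypress_instructions_spec : Claim_equal_keypress_instructions := by
  intro password _
  unfold Spec_keypress_instructions keypress_instructions keypress_instructions_alt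
  rw [pvA_eq_map, pv_foldl_app]
  simp only [List.nil_append]
  exact List.map_congr_left (fun c _ => pvStep_eq c)
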